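-- pv_equiv track=rewrite | github.com/harsh15106/MedIQ | Symptom Chatbot/hybrid_decision_engine.py | apply_risk_weighting
-- ===== SOURCE A (Python) =====
-- def apply_risk_weighting(scores, age, smoker, family_history):
--
--     for disease in scores:
--
--         # Age boosts
--         if age >= 60:
--             if disease in ["Heart attack", "Pneumonia", "Hypertension"]:
--                 scores[disease] += 3
--
--         # Smoking boosts
--         if smoker:
--             if disease in ["Pneumonia", "Tuberculosis", "Bronchial Asthma"]:
--                 scores[disease] += 3
--
--         # Family cardiac risk
--         if family_history:
--             if disease == "Heart attack":
--                 scores[disease] += 5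
--
--     return scores
-- ===== SOURCE B (Python) =====
-- def apply_risk_weighting(scores, age, smoker, family_history):
--     # Rule-driven: iterate over the fixed risk lists, not over the disease dict.
--     if age >= 60:
--         for d in ["Heart attack", "Pneumonia", "Hypertension"]:
--             if d in scores:
--                 scores[d] += 3
--     if smoker:
--         for d in ["Pneumonia", "Tuberculosis", "Bronchial Asthma"]:
--             if d in scores:
--                 scores[d] += 3
--     if family_history and "Heart attack" in scores:
--         scores["Heart attack"] += 5
--     return scores
-- ===== Notes on version B (the rewrite author's own statement) =====
-- stated objective: simpler
-- what changed: Instead of scanning every disease in the dict and testing each against three literal risk lists, B iterates over the fixed risk-rule lists and bumps only those diseases that are present in the dict.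
import Mathlib
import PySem

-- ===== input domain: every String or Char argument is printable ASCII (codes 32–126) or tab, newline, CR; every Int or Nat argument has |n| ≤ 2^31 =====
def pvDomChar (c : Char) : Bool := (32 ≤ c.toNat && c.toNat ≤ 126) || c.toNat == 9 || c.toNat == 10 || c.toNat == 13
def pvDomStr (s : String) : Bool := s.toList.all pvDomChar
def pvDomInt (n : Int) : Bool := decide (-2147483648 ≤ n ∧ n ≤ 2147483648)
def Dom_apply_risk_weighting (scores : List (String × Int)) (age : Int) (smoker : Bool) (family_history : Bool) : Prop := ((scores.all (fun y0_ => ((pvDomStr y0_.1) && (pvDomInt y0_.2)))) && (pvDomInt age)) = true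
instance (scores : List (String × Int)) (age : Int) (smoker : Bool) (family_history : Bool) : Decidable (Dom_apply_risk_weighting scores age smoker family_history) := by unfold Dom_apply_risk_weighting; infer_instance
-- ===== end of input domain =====

-- B inverts the traversal: it walks the fixed risk-rule lists and bumps the diseases present in the
-- dict, instead of scanning every disease against literal lists; both mutate the dict in place in
-- Python, and the equivalence proved here is about the returned association list.


-- ===== PORT A =====
-- the body of A's "for disease in scores" loop (nested ifs in the source order)
def pvStepA (age : Int) (smoker : Bool) (family_history : Bool)
    (d : PySem.Dict String Int) (disease : String) : PySem.Dict String Int :=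
  let d1 := if age ≥ 60 then
      (if disease ∈ ["Heart attack", "Pneumonia", "Hypertension"] then d.modify disease 0 (· + 3) else d)
    else d
  let d2 := if smoker then
      (if disease ∈ ["Pneumonia", "Tuberculosis", "Bronchial Asthma"] then d1.modify disease 0 (· + 3) else d1)
    else d1
  if family_history then
      (if disease = "Heart attack" then d2.modify disease 0 (· + 5) else d2)
    else d2

def apply_risk_weighting (scores : List (String × Int)) (age : Int) (smoker : Bool) (family_history : Bool) : List (String × Int) :=
  ((PySem.Dict.mk scores).keys.foldl (pvStepA age smoker family_history) (PySem.Dict.mk scores)).items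

-- ===== PORT B =====
-- the body of B's "for d in <rule list>" loops: bump a present key by c
def pvBump (c : Int) (d : PySem.Dict String Int) (k : String) : PySem.Dict String Int :=
  if d.contains k then d.modify k 0 (· + c) else d

def apply_risk_weighting_alt (scores : List (String × Int)) (age : Int) (smoker : Bool) (family_history : Bool) : List (String × Int) :=
  let d0 := PySem.Dict.mk scores
  let d1 := if age ≥ 60 then ["Heart attack", "Pneumonia", "Hypertension"].foldl (pvBump 3) d0 else d0
  let d2 := if smoker then ["Pneumonia", "Tuberculosis", "Bronchial Asthma"].foldl (pvBump 3) d1 else d1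
  let d3 := if family_history ∧ d2.contains "Heart attack" then d2.modify "Heart attack" 0 (· + 5) else d2
  d3.items

-- ===== PRECONDITION & SPEC =====
-- scores stands for a Python dict; an association list with duplicate keys represents no dict, so
-- Pre_ requires the keys to be distinct (A and B touch different occurrences on duplicated keys).
def Pre_apply_risk_weighting (scores : List (String × Int)) (age : Int) (smoker : Bool) (family_history : Bool) : Prop :=
  (scores.map Prod.fst).Nodup
instance (scores : List (String × Int)) (age : Int) (smoker : Bool) (family_history : Bool) : Decidable (Pre_apply_risk_weighting scores age smoker family_history) := by unfold Pre_apply_risk_weighting; infer_instance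

def pvWitness_apply_risk_weighting : (List (String × Int)) × Int × Bool × Bool :=
  ([("Heart attack", 2), ("Flu", 1)], 61, true, true)

def Spec_apply_risk_weighting (scores : List (String × Int)) (age : Int) (smoker : Bool) (family_history : Bool) (out : List (String × Int)) : Prop := out = apply_risk_weighting_alt scores age smoker family_history
instance (scores : List (String × Int)) (age : Int) (smoker : Bool) (family_history : Bool) (out : List (String × Int)) : Decidable (Spec_apply_risk_weighting scores age smoker family_history out) := by unfold Spec_apply_risk_weighting; infer_instance

-- ===== CLAIM (what is proved, stated in full; the proofs are below) =====
def Claim_equal_apply_risk_weighting : Prop := ∀ (scores : List (String × Int)) (age : Int) (smoker : Bool) (family_history : Bool), Dom_apply_risk_weighting scores age smoker family_history → Pre_apply_risk_weighting scores age smoker family_history → Spec_apply_risk_weighting scores age smoker family_history (apply_risk_weighting scores age smoker family_history)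

-- ===== LEMMAS AND PROOFS =====

-- the total boost every program adds to the score of a present disease
def pvDelta (age : Int) (smoker : Bool) (family_history : Bool) (k : String) : Int :=
  (if age ≥ 60 ∧ k ∈ ["Heart attack", "Pneumonia", "Hypertension"] then 3 else 0)
  + (if smoker ∧ k ∈ ["Pneumonia", "Tuberculosis", "Bronchial Asthma"] then 3 else 0)
  + (if family_history ∧ k = "Heart attack" then 5 else 0)

-- stages of B's pipeline, named so goals never hide them behind let-binders
def pvB1 (scores : List (String × Int)) (age : Int) : PySem.Dict String Int :=
  if age ≥ 60 then ["Heart attack", "Pneumonia", "Hypertension"].foldl (pvBump 3) (PySem.Dict.mk scores) else PySem.Dict.mk scores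
def pvB2 (scores : List (String × Int)) (age : Int) (smoker : Bool) : PySem.Dict String Int :=
  if smoker then ["Pneumonia", "Tuberculosis", "Bronchial Asthma"].foldl (pvBump 3) (pvB1 scores age) else pvB1 scores age
def pvB3 (scores : List (String × Int)) (age : Int) (smoker : Bool) (family_history : Bool) : PySem.Dict String Int :=
  if family_history ∧ (pvB2 scores age smoker).contains "Heart attack" then (pvB2 scores age smoker).modify "Heart attack" 0 (· + 5) else pvB2 scores age smoker

theorem alt_eq_pvB3 (scores : List (String × Int)) (age : Int) (smoker : Bool) (family_history : Bool) :
    apply_risk_weighting_alt scores age smoker family_history = (pvB3 scores age smoker family_history).items := rfl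

theorem keys_modify_of_contains (d : PySem.Dict String Int) (k : String) (f : Int → Int)
    (hc : d.contains k = true) : (d.modify k 0 f).keys = d.keys := by
  rw [PySem.Dict.keys_modify, PySem.Dict.keys_insert_of_contains _ _ hc]

theorem contains_of_keys_eq (d d' : PySem.Dict String Int) (h : d'.keys = d.keys) (k : String) :
    d'.contains k = d.contains k := by
  rw [PySem.Dict.contains_eq_decide_mem_keys, h, ← PySem.Dict.contains_eq_decide_mem_keys]

theorem keys_stepA (age : Int) (smoker : Bool) (family_history : Bool)
    (d : PySem.Dict String Int) (k : String) (hc : d.contains k = true) :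
    (pvStepA age smoker family_history d k).keys = d.keys := by
  have step : ∀ (P Q : Prop) [Decidable P] [Decidable Q] (d' : PySem.Dict String Int) (c : Int),
      d'.keys = d.keys →
      (if P then (if Q then d'.modify k 0 (· + c) else d') else d').keys = d.keys := by
    intro P Q _ _ d' c h
    split_ifs
    · exact (keys_modify_of_contains _ _ _ (by rw [contains_of_keys_eq d d' h]; exact hc)).trans h
    · exact h
    · exact h
  exact step _ _ _ _ (step _ _ _ _ (step _ _ _ _ rfl))

theorem getD_stepA (age : Int) (smoker : Bool) (family_history : Bool)
    (d : PySem.Dict String Int) (k k' : String) :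
    (pvStepA age smoker family_history d k).getD k' 0 =
      if k' = k then d.getD k 0 + pvDelta age smoker family_history k else d.getD k' 0 := by
  unfold pvStepA pvDelta
  by_cases hk : k' = k <;>
    split_ifs <;> simp_all [PySem.Dict.getD_modify] <;> omega

theorem foldA_spec (age : Int) (smoker : Bool) (family_history : Bool) :
    ∀ (ks : List String) (d : PySem.Dict String Int), ks.Nodup →
      (∀ k ∈ ks, d.contains k = true) →
      (ks.foldl (pvStepA age smoker family_history) d).keys = d.keys ∧
      ∀ k, (ks.foldl (pvStepA age smoker family_history) d).getD k 0 =
        d.getD k 0 + (if k ∈ ks then pvDelta age smoker family_history k else 0) := by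
  intro ks
  induction ks with
  | nil => intro d _ _; simp
  | cons r rest ih =>
    intro d hnd hc
    have hcr : d.contains r = true := hc r (by simp)
    have hkeys : (pvStepA age smoker family_history d r).keys = d.keys := keys_stepA _ _ _ _ _ hcr
    have hcont : ∀ k ∈ rest, (pvStepA age smoker family_history d r).contains k = true := by
      intro k hk
      rw [contains_of_keys_eq d _ hkeys]
      exact hc k (by simp [hk])
    obtain ⟨ihk, ihg⟩ := ih (pvStepA age smoker family_history d r) hnd.of_cons hcont
    refine ⟨by simpa [hkeys] using ihk, ?_⟩
    intro k
    have hrrest : r ∉ rest := (List.nodup_cons.mp hnd).1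
    rw [List.foldl_cons, ihg k, getD_stepA]
    by_cases hk : k = r
    · subst hk
      simp [hrrest]
    · simp [hk, List.mem_cons]

theorem keys_bump (c : Int) (d : PySem.Dict String Int) (k : String) :
    (pvBump c d k).keys = d.keys := by
  unfold pvBump
  split_ifs with h
  · exact keys_modify_of_contains _ _ _ h
  · rfl

theorem getD_bump (c : Int) (d : PySem.Dict String Int) (k k' : String) :
    (pvBump c d k).getD k' 0 =
      d.getD k' 0 + (if k' = k ∧ d.contains k = true then c else 0) := by
  unfold pvBump
  by_cases hk : k' = k <;> split_ifs <;> simp_all [PySem.Dict.getD_modify]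

theorem foldB_spec (c : Int) :
    ∀ (R : List String) (d : PySem.Dict String Int), R.Nodup →
      (R.foldl (pvBump c) d).keys = d.keys ∧
      ∀ k, (R.foldl (pvBump c) d).getD k 0 =
        d.getD k 0 + (if k ∈ R ∧ d.contains k = true then c else 0) := by
  intro R
  induction R with
  | nil => intro d _; simp
  | cons r rest ih =>
    intro d hnd
    have hkeys := keys_bump c d r
    have hcont := contains_of_keys_eq d _ hkeys
    obtain ⟨ihk, ihg⟩ := ih (pvBump c d r) hnd.of_cons
    refine ⟨by simpa [hkeys] using ihk, ?_⟩
    intro k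
    have hrrest : r ∉ rest := (List.nodup_cons.mp hnd).1
    rw [List.foldl_cons, ihg k, hcont, getD_bump]
    by_cases hk : k = r
    · subst hk
      by_cases hc : d.contains k = true <;> simp [hc, hrrest]
    · simp [hk, List.mem_cons]

theorem keys_pvB1 (scores : List (String × Int)) (age : Int) :
    (pvB1 scores age).keys = (PySem.Dict.mk scores).keys := by
  unfold pvB1
  split_ifs
  · exact (foldB_spec 3 _ _ (by decide)).1
  · rfl

theorem getD_pvB1 (scores : List (String × Int)) (age : Int) (k : String) :
    (pvB1 scores age).getD k 0 = (PySem.Dict.mk scores).getD k 0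
      + (if age ≥ 60 ∧ k ∈ ["Heart attack", "Pneumonia", "Hypertension"] ∧ (PySem.Dict.mk scores).contains k = true then 3 else 0) := by
  unfold pvB1
  split_ifs with ha h h
  · rw [(foldB_spec 3 _ _ (by decide)).2 k]
    simp [h.2.1, h.2.2]
  · rw [(foldB_spec 3 _ _ (by decide)).2 k]
    have hx : ¬ (k ∈ ["Heart attack", "Pneumonia", "Hypertension"] ∧ (PySem.Dict.mk scores).contains k = true) := by
      intro hx; exact h ⟨ha, hx.1, hx.2⟩
    rw [if_neg hx]
  · exact absurd h.1 ha
  · simp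

theorem keys_pvB2 (scores : List (String × Int)) (age : Int) (smoker : Bool) :
    (pvB2 scores age smoker).keys = (PySem.Dict.mk scores).keys := by
  unfold pvB2
  split_ifs
  · exact ((foldB_spec 3 _ _ (by decide)).1).trans (keys_pvB1 scores age)
  · exact keys_pvB1 scores age

theorem getD_pvB2 (scores : List (String × Int)) (age : Int) (smoker : Bool) (k : String) :
    (pvB2 scores age smoker).getD k 0 = (pvB1 scores age).getD k 0
      + (if smoker ∧ k ∈ ["Pneumonia", "Tuberculosis", "Bronchial Asthma"] ∧ (PySem.Dict.mk scores).contains k = true then 3 else 0) := by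
  unfold pvB2
  have hcnt := contains_of_keys_eq (PySem.Dict.mk scores) _ (keys_pvB1 scores age) k
  split_ifs with hs h h
  · rw [(foldB_spec 3 _ _ (by decide)).2 k, hcnt]
    simp [h.2.1, h.2.2]
  · rw [(foldB_spec 3 _ _ (by decide)).2 k, hcnt]
    have hx : ¬ (k ∈ ["Pneumonia", "Tuberculosis", "Bronchial Asthma"] ∧ (PySem.Dict.mk scores).contains k = true) := by
      intro hx; exact h ⟨hs, hx.1, hx.2⟩
    rw [if_neg hx]
  · exact absurd h.1 hs
  · simp

theorem keys_pvB3 (scores : List (String × Int)) (age : Int) (smoker : Bool) (family_history : Bool) :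
    (pvB3 scores age smoker family_history).keys = (PySem.Dict.mk scores).keys := by
  unfold pvB3
  split_ifs with hf
  · exact (keys_modify_of_contains _ _ _ hf.2).trans (keys_pvB2 scores age smoker)
  · exact keys_pvB2 scores age smoker

theorem getD_pvB3 (scores : List (String × Int)) (age : Int) (smoker : Bool) (family_history : Bool)
    (k : String) (hck : (PySem.Dict.mk scores).contains k = true) :
    (pvB3 scores age smoker family_history).getD k 0 =
      (PySem.Dict.mk scores).getD k 0 + pvDelta age smoker family_history k := by
  have hcnt2 := contains_of_keys_eq (PySem.Dict.mk scores) _ (keys_pvB2 scores age smoker)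
  have base : (pvB2 scores age smoker).getD k 0 = (PySem.Dict.mk scores).getD k 0
      + (if age ≥ 60 ∧ k ∈ ["Heart attack", "Pneumonia", "Hypertension"] then 3 else 0)
      + (if smoker ∧ k ∈ ["Pneumonia", "Tuberculosis", "Bronchial Asthma"] then 3 else 0) := by
    rw [getD_pvB2, getD_pvB1]
    by_cases ha : age ≥ 60 ∧ k ∈ ["Heart attack", "Pneumonia", "Hypertension"] <;>
      by_cases hs : smoker ∧ k ∈ ["Pneumonia", "Tuberculosis", "Bronchial Asthma"] <;>
        simp_all
  unfold pvB3
  split_ifs with hf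
  · rw [PySem.Dict.getD_modify]
    rcases hf with ⟨hfam, hha⟩
    by_cases hk : k = "Heart attack"
    · subst hk
      rw [if_pos rfl, base]
      simp only [pvDelta, hfam]
      norm_num
      ring
    · rw [if_neg hk, base]
      have hx : ¬ ((family_history = true) ∧ k = "Heart attack") := fun h => hk h.2
      simp only [pvDelta]
      rw [if_neg hx]
      omega
  · have hx : ¬ ((family_history = true) ∧ k = "Heart attack") := by
      intro ⟨hfam, hk⟩
      exact hf ⟨hfam, by rw [hcnt2 "Heart attack", ← hk]; exact hck⟩
    rw [base]
    simp only [pvDelta]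
    rw [if_neg hx]
    omega

-- ===== VERDICT (by name: the statement is the Claim_ definition above) =====
theorem apply_risk_weighting_spec : Claim_equal_apply_risk_weighting := by
  intro scores age smoker family_history _ hpre
  unfold Spec_apply_risk_weighting
  rw [alt_eq_pvB3]
  unfold apply_risk_weighting
  have hnd : (PySem.Dict.mk scores).keys.Nodup := by
    simpa [PySem.Dict.keys] using hpre
  have hcAll : ∀ k ∈ (PySem.Dict.mk scores).keys, (PySem.Dict.mk scores).contains k = true := by
    intro k hk
    rw [PySem.Dict.contains_eq_decide_mem_keys]
    simpa using hk
  obtain ⟨hAk, hAg⟩ := foldA_spec age smoker family_history (PySem.Dict.mk scores).keys (PySem.Dict.mk scores) hnd hcAll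
  have hAnd : ((PySem.Dict.mk scores).keys.foldl (pvStepA age smoker family_history) (PySem.Dict.mk scores)).keys.Nodup := by
    rw [hAk]; exact hnd
  have hBnd : (pvB3 scores age smoker family_history).keys.Nodup := by
    rw [keys_pvB3]; exact hnd
  rw [PySem.Dict.items_eq_map_keys _ hAnd 0, PySem.Dict.items_eq_map_keys _ hBnd 0, hAk, keys_pvB3]
  apply List.map_congr_left
  intro k hk
  have hck := hcAll k hk
  rw [hAg k, getD_pvB3 scores age smoker family_history k hck, if_pos hk]
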